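-- pv_equiv track=rewrite | github.com/eliottcassidy2000/math | 04-computation/blackself8_v2.py | find_all_anti_automorphisms_involutive
-- ===== SOURCE A (Python) =====
-- def find_all_anti_automorphisms_involutive(T, n):
--     """Find all involutive anti-automorphisms of T.
--     alpha is involutive: alpha^2 = id.
--     Anti-aut: T(alpha(u), alpha(v)) = T(v, u).
--     """
--     Top = [[T[j][i] for j in range(n)] for i in range(n)]
--     scores_T = [sum(T[i][j] for j in range(n) if j != i) for i in range(n)]
--     scores_Top = [sum(Top[i][j] for j in range(n) if j != i) for i in range(n)]
--
--     # Anti-aut maps T to T^op, so alpha(v) must have same out-degree in T^op as v in T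
--     # out-degree in T^op = in-degree in T = n-1 - out-degree in T
--     # So alpha maps vertex with out-deg d to vertex with out-deg n-1-d
--
--     results = []
--
--     def backtrack(v, perm, used):
--         if v == n:
--             # Must be involution
--             if all(perm[perm[i]] == i for i in range(n)):
--                 results.append(tuple(perm))
--             return
--         target_score = n - 1 - scores_T[v]
--         for u in range(n):
--             if u in used:
--                 continue
--             if scores_T[u] != target_score:
--                 continue
--             perm[v] = u
--             ok = True
--             for w in range(v):
--                 # Check: T(perm[v], perm[w]) = T(w, v)
--                 if T[u][perm[w]] != T[w][v]:
--                     ok = False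
--                     break
--                 if T[perm[w]][u] != T[v][w]:
--                     ok = False
--                     break
--             if ok:
--                 used.add(u)
--                 backtrack(v + 1, perm, used)
--                 used.remove(u)
--             perm[v] = -1
--
--     backtrack(0, [-1]*n, set())
--     return results
-- ===== SOURCE B (Python) =====
-- def find_all_anti_automorphisms_involutive(T, n):
--     """Flat generate-and-test over all permutations of range(n) in lexicographic
--     order, accepting exactly those that pass A's degree-compatibility,
--     involution and anti-automorphism conditions."""
--     scores = [sum(T[i][j] for j in range(n) if j != i) for i in range(n)]
--
--     def perms(avail):
--         if not avail:
--             yield []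
--         else:
--             for k in range(len(avail)):
--                 for rest in perms(avail[:k] + avail[k + 1:]):
--                     yield [avail[k]] + rest
--
--     results = []
--     for p in perms(list(range(n))):
--         if (all(scores[p[i]] == n - 1 - scores[i] for i in range(n))
--                 and all(p[p[i]] == i for i in range(n))
--                 and all(T[p[i]][p[j]] == T[j][i]
--                         for i in range(n) for j in range(n) if i != j)):
--             results.append(tuple(p))
--     return results
-- ===== Notes on version B (the rewrite author's own statement) =====
-- stated objective: alternative
-- what changed: Replaced the recursive pruned backtracking over partial assignments by a flat generate-and-test: enumerate all permutations of range(n) in lexicographic order and keep those passing A's degree-compatibility, involution and off-diagonal anti-automorphism checks on the complete candidate.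
import Mathlib
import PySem

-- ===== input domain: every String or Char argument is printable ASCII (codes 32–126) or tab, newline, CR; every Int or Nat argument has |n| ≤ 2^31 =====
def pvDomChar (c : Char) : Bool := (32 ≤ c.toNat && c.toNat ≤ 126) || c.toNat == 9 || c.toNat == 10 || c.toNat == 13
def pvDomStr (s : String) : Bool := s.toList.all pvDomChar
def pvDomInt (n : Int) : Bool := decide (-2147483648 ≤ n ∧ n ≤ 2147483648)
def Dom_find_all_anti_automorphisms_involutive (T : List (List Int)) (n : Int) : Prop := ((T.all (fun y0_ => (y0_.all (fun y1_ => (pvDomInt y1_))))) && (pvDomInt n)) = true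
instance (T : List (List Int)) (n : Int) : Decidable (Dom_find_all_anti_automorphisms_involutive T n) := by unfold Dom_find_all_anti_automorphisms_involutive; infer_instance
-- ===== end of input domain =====

-- B replaces A's recursive pruned backtracking by a flat generate-and-test over all
-- permutations in lexicographic order (objective: alternative, not faster).

-- ===== PORT A =====
-- T[i][j]; all indices used by either algorithm are in range under Pre_, where getD is exact.
def pvT (T : List (List Int)) (i j : Nat) : Int := (T.getD i []).getD j 0

-- scores_T = [sum(T[i][j] for j in range(n) if j != i) for i in range(n)]  (same comprehension in A and B)
def pvScores (T : List (List Int)) (n : Nat) : List Int :=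
  (List.range n).map (fun i => (((List.range n).filter (fun j => j ≠ i)).map (fun j => pvT T i j)).sum)

-- all(perm[perm[i]] == i for i in range(n)) — the involution test, textually identical in A and B.
-- perm entries are assigned values in [0, n) wherever this is reached, so .toNat is exact there.
def pvInv (n : Nat) (perm : List Int) : Bool :=
  (List.range n).all (fun i => perm.getD (perm.getD i 0).toNat 0 == (i : Int))

-- A's inner 'for w in range(v)' check with early break; perm already has perm[v] = u set.
def pvOk (T : List (List Int)) (perm : List Int) (u v : Nat) : List Nat → Bool
  | [] => true
  | w :: ws =>
    if pvT T u (perm.getD w 0).toNat ≠ pvT T w v then false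
    else if pvT T (perm.getD w 0).toNat u ≠ pvT T v w then false
    else pvOk T perm u v ws

-- A's backtrack(v, perm, used); structural fuel k = n - v (base k = 0 is Python's v == n).
-- 'used' is Python's set of used values (never sees duplicates); results are concatenated in DFS order,
-- and the functional perm.set makes Python's perm[v] = -1 restoration a no-op.
def pvBT (T : List (List Int)) (n : Nat) (scores : List Int) :
    Nat → Nat → List Int → List Nat → List (List Int)
  | 0, _, perm, _ => if pvInv n perm then [perm] else []
  | k+1, v, perm, used =>
    (List.range n).foldl (fun acc u =>
      if used.contains u then acc
      else if scores.getD u 0 ≠ (n : Int) - 1 - scores.getD v 0 then acc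
      else
        let perm' := perm.set v (u : Int)
        if pvOk T perm' u v (List.range v) then acc ++ pvBT T n scores k (v + 1) perm' (u :: used)
        else acc) []

-- A also builds Top and scores_Top but never reads either (pure dead code); they are omitted.
-- nI.toNat: Pre_ gives 0 ≤ nI (Python raises for negative n).
def find_all_anti_automorphisms_involutive (T : List (List Int)) (nI : Int) : List (List Int) :=
  let n := nI.toNat
  pvBT T n (pvScores T n) n 0 (List.replicate n (-1)) []

-- ===== PORT B =====
-- perms(avail): pick each element in turn (avail is always duplicate-free, so erasing the
-- first occurrence is removing the picked position), recurse on the rest; fuel = length.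
def altPerms : Nat → List Int → List (List Int)
  | _, [] => [[]]
  | 0, _ :: _ => []
  | k + 1, x :: xs =>
    (x :: xs).flatMap (fun u => (altPerms k ((x :: xs).erase u)).map (fun rest => u :: rest))

-- B's acceptance test on a complete candidate p.
def altPred (T : List (List Int)) (n : Nat) (scores : List Int) (p : List Int) : Bool :=
  (List.range n).all (fun i => scores.getD (p.getD i 0).toNat 0 == (n : Int) - 1 - scores.getD i 0)
  && pvInv n p
  && (List.range n).all (fun i => (List.range n).all (fun j =>
       i == j || pvT T (p.getD i 0).toNat (p.getD j 0).toNat == pvT T j i))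

def find_all_anti_automorphisms_involutive_alt (T : List (List Int)) (nI : Int) : List (List Int) :=
  let n := nI.toNat
  let scores := pvScores T n
  (altPerms n ((List.range n).map (fun i : Nat => (i : Int)))).foldl
    (fun res p => if altPred T n scores p then res ++ [p] else res) []

-- ===== PRECONDITION & SPEC =====
-- Exactly the inputs on which the Python A returns: n ≥ 0, at least n rows, and each of the
-- first n rows has at least n entries (otherwise A raises IndexError).
def Pre_find_all_anti_automorphisms_involutive (T : List (List Int)) (n : Int) : Prop :=
  0 ≤ n ∧ n.toNat ≤ T.length ∧ ∀ row ∈ T.take n.toNat, n.toNat ≤ row.length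
instance (T : List (List Int)) (n : Int) : Decidable (Pre_find_all_anti_automorphisms_involutive T n) := by unfold Pre_find_all_anti_automorphisms_involutive; infer_instance

def pvWitness_find_all_anti_automorphisms_involutive : List (List Int) × Int := ([[0, 1], [1, 0]], 2)

def Spec_find_all_anti_automorphisms_involutive (T : List (List Int)) (n : Int) (out : List (List Int)) : Prop := out = find_all_anti_automorphisms_involutive_alt T n
instance (T : List (List Int)) (n : Int) (out : List (List Int)) : Decidable (Spec_find_all_anti_automorphisms_involutive T n out) := by unfold Spec_find_all_anti_automorphisms_involutive; infer_instance

-- ===== CLAIM (what is proved, stated in full; the proofs are below) =====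
def Claim_equal_find_all_anti_automorphisms_involutive : Prop := ∀ (T : List (List Int)) (n : Int), Dom_find_all_anti_automorphisms_involutive T n → Pre_find_all_anti_automorphisms_involutive T n → Spec_find_all_anti_automorphisms_involutive T n (find_all_anti_automorphisms_involutive T n)

-- ===== LEMMAS AND PROOFS =====

-- generic list facts

theorem pv_filterMap_const_none {a b : Type} (l : List a) :
    (l.filterMap fun _ => (none : Option b)) = [] := by
  induction l with
  | nil => rfl
  | cons x xs ih => simp [ih]

theorem pv_filterMap_guard {a : Type} (l : List a) (p : a → Bool) :
    (l.filterMap fun x => if p x then some x else none) = l.filter p := by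
  induction l with
  | nil => rfl
  | cons x xs ih => by_cases h : p x <;> simp [h, ih]

theorem pv_flatMap_skip {a b : Type} (l : List a) (p : a → Bool) (f : a → List b) :
    (l.flatMap fun u => if p u then [] else f u) = (l.filter fun u => !p u).flatMap f := by
  induction l with
  | nil => rfl
  | cons x xs ih => by_cases h : p x <;> simp [List.filter_cons, h, ih]

theorem pv_set_append (pre : List Int) (a x : Int) (r : List Int) :
    (pre ++ a :: r).set pre.length x = pre ++ x :: r := by
  induction pre with
  | nil => rfl
  | cons h t ih => simp [ih]

theorem pv_getD_append (pre : List Int) (x : Int) (r : List Int) (d : Int) :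
    (pre ++ x :: r).getD pre.length d = x := by
  induction pre with
  | nil => rfl
  | cons h t ih => simp

theorem pv_if_false_iff (c : Prop) [Decidable c] (b : Bool) :
    ((if c then false else b) = true) ↔ (¬ c ∧ b = true) := by
  split_ifs with h <;> simp [h]

-- pvOk facts

theorem pvOk_congr (T : List (List Int)) (p1 p2 : List Int) (u v : Nat) (ws : List Nat)
    (h : ∀ w ∈ ws, p1.getD w 0 = p2.getD w 0) : pvOk T p1 u v ws = pvOk T p2 u v ws := by
  induction ws with
  | nil => rfl
  | cons w ws ih =>
    simp only [pvOk, h w (List.mem_cons_self)]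
    split_ifs <;> first | rfl | exact ih fun w hw => h w (List.mem_cons_of_mem _ hw)

theorem pvOk_iff (T : List (List Int)) (p : List Int) (u v : Nat) (ws : List Nat) :
    pvOk T p u v ws = true ↔
      ∀ w ∈ ws, pvT T u (p.getD w 0).toNat = pvT T w v ∧ pvT T (p.getD w 0).toNat u = pvT T v w := by
  induction ws with
  | nil => simp [pvOk]
  | cons w ws ih =>
    by_cases h1 : pvT T u (p.getD w 0).toNat = pvT T w v <;>
      by_cases h2 : pvT T (p.getD w 0).toNat u = pvT T v w <;>
        simp [pvOk, h1, h2, ih, and_assoc]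

-- every member of altPerms k l (with l.length = k) has length k

theorem altPerms_length : ∀ (k : Nat) (l : List Int), l.length = k →
    ∀ ext ∈ altPerms k l, ext.length = k := by
  intro k
  induction k with
  | zero =>
    intro l hl ext hext
    have h0 : l = [] := List.length_eq_zero_iff.mp hl
    subst h0
    simp only [altPerms, List.mem_singleton] at hext
    subst hext; rfl
  | succ k ih =>
    intro l hl ext hext
    cases l with
    | nil => simp at hl
    | cons x xs =>
      simp only [altPerms, List.mem_flatMap, List.mem_map] at hext
      obtain ⟨u, hu, rest, hrest, rfl⟩ := hext
      have hel : ((x :: xs).erase u).length = k := by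
        rw [List.length_erase_of_mem hu, hl]
        omega
      have := ih _ hel rest hrest
      simp [this]

-- the incremental acceptance predicate: commit prefix pre, then run A's per-level checks on ext

def pvQ (T : List (List Int)) (n : Nat) (scores : List Int) : List Int → List Int → Bool
  | pre, [] => pvInv n pre
  | pre, u :: ext =>
    if scores.getD u.toNat 0 ≠ (n : Int) - 1 - scores.getD pre.length 0 then false
    else if pvOk T (pre ++ [u]) u.toNat pre.length (List.range pre.length) then
      pvQ T n scores (pre ++ [u]) ext
    else false

-- the same per-level check read off a complete candidate

def pvStep (T : List (List Int)) (n : Nat) (scores : List Int) (full : List Int) (i : Nat) : Bool :=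
  if scores.getD (full.getD i 0).toNat 0 ≠ (n : Int) - 1 - scores.getD i 0 then false
  else pvOk T full (full.getD i 0).toNat i (List.range i)

-- BRIDGE: backtracking = filterMap of pvQ over the lexicographic permutations of the unused values

theorem pvBT_bridge (T : List (List Int)) (n : Nat) (scores : List Int) :
    ∀ (k : Nat) (pre : List Int) (used : List Nat),
      ((List.range n).filter fun u => !used.contains u).length = k →
      pvBT T n scores k pre.length (pre ++ List.replicate k (-1)) used
        = (altPerms k (((List.range n).filter fun u => !used.contains u).map fun i : Nat => (i : Int))).filterMap
            fun ext => if pvQ T n scores pre ext then some (pre ++ ext) else none := by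
  intro k
  induction k with
  | zero =>
    intro pre used hk
    have h0 : ((List.range n).filter fun u => !used.contains u) = [] :=
      List.length_eq_zero_iff.mp hk
    rw [h0]
    by_cases h : pvInv n pre = true <;> simp [pvBT, altPerms, pvQ, h]
  | succ k ih =>
    intro pre used hk
    have hinj : Function.Injective (fun i : Nat => (i : Int)) := fun a b h => by simpa using h
    -- reshape the fold into a flatMap
    have hfold : pvBT T n scores (k + 1) pre.length (pre ++ List.replicate (k + 1) (-1)) used
        = (List.range n).flatMap (fun u =>
            if used.contains u then [] else
            if scores.getD u 0 ≠ (n : Int) - 1 - scores.getD pre.length 0 then [] else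
            if pvOk T ((pre ++ List.replicate (k + 1) (-1)).set pre.length (u : Int)) u pre.length
                (List.range pre.length) then
              pvBT T n scores k (pre.length + 1)
                ((pre ++ List.replicate (k + 1) (-1)).set pre.length (u : Int)) (u :: used)
            else []) := by
      simp only [pvBT]
      rw [PySem.List.foldl_congr_mem _ _
        (fun acc u => acc ++ (if used.contains u then [] else
            if scores.getD u 0 ≠ (n : Int) - 1 - scores.getD pre.length 0 then [] else
            if pvOk T ((pre ++ List.replicate (k + 1) (-1)).set pre.length (u : Int)) u pre.length
                (List.range pre.length) then
              pvBT T n scores k (pre.length + 1)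
                ((pre ++ List.replicate (k + 1) (-1)).set pre.length (u : Int)) (u :: used)
            else [])) _ ?_]
      · rw [PySem.List.foldl_append_eq_flatMap, List.nil_append]
      · intro acc u _
        dsimp only
        split_ifs <;> simp only [List.append_nil]
    rw [hfold, pv_flatMap_skip]
    -- the remaining available values
    obtain ⟨x, xs, hx⟩ : ∃ x xs, ((List.range n).filter fun u => !used.contains u) = x :: xs := by
      cases h : (List.range n).filter fun u => !used.contains u with
      | nil => rw [h] at hk; simp at hk
      | cons x xs => exact ⟨x, xs, rfl⟩
    rw [hx, show ((x :: xs).map fun i : Nat => (i : Int)) = ((x : Int) :: xs.map fun i : Nat => (i : Int)) from by simp]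
    rw [show altPerms (k + 1) ((x : Int) :: xs.map fun i : Nat => (i : Int))
        = ((x : Int) :: xs.map fun i : Nat => (i : Int)).flatMap (fun u =>
            (altPerms k (((x : Int) :: xs.map fun i : Nat => (i : Int)).erase u)).map
              (fun rest => u :: rest)) from rfl]
    rw [show ((x : Int) :: xs.map fun i : Nat => (i : Int)) = ((x :: xs).map fun i : Nat => (i : Int)) from by simp]
    rw [List.filterMap_flatMap, List.flatMap_map]
    apply List.flatMap_congr
    intro u hu
    have hu' := hu
    rw [← hx, List.mem_filter] at hu'
    obtain ⟨hun, huu⟩ := hu'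
    have hset : (pre ++ List.replicate (k + 1) (-1)).set pre.length (u : Int)
        = pre ++ (u : Int) :: List.replicate k (-1) := by
      rw [List.replicate_succ, pv_set_append]
    have hnodup : ((List.range n).filter fun w => !used.contains w).Nodup :=
      List.nodup_range.filter _
    have e1 : ((x :: xs).erase u) = (List.range n).filter fun w => !(u :: used).contains w := by
      rw [← hx, hnodup.erase_eq_filter, List.filter_filter]
      apply List.filter_congr
      intro a _
      simp only [List.contains_cons, Bool.not_or, bne]
    have e2 : (((x :: xs).map fun i : Nat => (i : Int)).erase (u : Int))
        = ((x :: xs).erase u).map fun i : Nat => (i : Int) :=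
      (List.map_erase hinj _).symm
    have e3 : ((List.range n).filter fun w => !(u :: used).contains w).length = k := by
      rw [← e1, List.length_erase_of_mem hu]
      rw [hx] at hk
      omega
    have hok : pvOk T (pre ++ (u : Int) :: List.replicate k (-1)) u pre.length (List.range pre.length)
        = pvOk T (pre ++ [(u : Int)]) u pre.length (List.range pre.length) := by
      apply pvOk_congr
      intro w hw
      rw [List.mem_range] at hw
      rw [List.getD_append _ _ _ _ hw, List.getD_append _ _ _ _ hw]
    rw [hset, hok, List.filterMap_map]
    by_cases hs : scores.getD u 0 ≠ (n : Int) - 1 - scores.getD pre.length 0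
    · rw [if_pos hs]
      rw [List.filterMap_congr (g := fun _ => (none : Option (List Int)))
        (fun ext _ => by
          simp only [Function.comp_apply, pvQ, Int.toNat_natCast]
          rw [if_pos hs]
          simp)]
      rw [pv_filterMap_const_none]
    · rw [if_neg hs]
      by_cases ho : pvOk T (pre ++ [(u : Int)]) u pre.length (List.range pre.length) = true
      · rw [if_pos ho]
        have hIH := ih (pre ++ [(u : Int)]) (u :: used) e3
        rw [List.length_append] at hIH
        simp only [List.length_cons, List.length_nil, Nat.zero_add] at hIH
        rw [show pre ++ (u : Int) :: List.replicate k (-1)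
            = (pre ++ [(u : Int)]) ++ List.replicate k (-1) from by simp]
        rw [hIH, e2, e1]
        apply List.filterMap_congr
        intro ext _
        simp only [Function.comp_apply, pvQ, Int.toNat_natCast]
        rw [if_neg hs, if_pos ho]
        simp
      · rw [if_neg ho]
        rw [List.filterMap_congr (g := fun _ => (none : Option (List Int)))
          (fun ext _ => by
            simp only [Function.comp_apply, pvQ, Int.toNat_natCast]
            rw [if_neg hs, if_neg ho]
            simp)]
        rw [pv_filterMap_const_none]

-- pvQ in terms of per-level checks of the complete candidate

theorem pvQ_eq_steps (T : List (List Int)) (n : Nat) (scores : List Int) :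
    ∀ (ext pre : List Int),
      pvQ T n scores pre ext
        = (pvInv n (pre ++ ext) && (List.range' pre.length ext.length).all (pvStep T n scores (pre ++ ext))) := by
  intro ext
  induction ext with
  | nil => intro pre; simp [pvQ]
  | cons u ext ih =>
    intro pre
    have hget : (pre ++ u :: ext).getD pre.length 0 = u := pv_getD_append pre u ext 0
    have hfull : pre ++ u :: ext = (pre ++ [u]) ++ ext := by simp
    have hok : pvOk T (pre ++ u :: ext) u.toNat pre.length (List.range pre.length)
        = pvOk T (pre ++ [u]) u.toNat pre.length (List.range pre.length) := by
      apply pvOk_congr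
      intro w hw
      rw [List.mem_range] at hw
      rw [List.getD_append _ _ _ _ hw, List.getD_append _ _ _ _ hw]
    have hlen : (pre ++ [u]).length = pre.length + 1 := by simp
    simp only [List.length_cons, List.range'_succ, List.all_cons]
    rw [show pvStep T n scores (pre ++ u :: ext) pre.length
        = (if scores.getD u.toNat 0 ≠ (n : Int) - 1 - scores.getD pre.length 0 then false
           else pvOk T (pre ++ [u]) u.toNat pre.length (List.range pre.length)) from by
      simp only [pvStep, hget, hok]]
    simp only [pvQ]
    by_cases hs : scores.getD u.toNat 0 ≠ (n : Int) - 1 - scores.getD pre.length 0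
    · rw [if_pos hs, if_pos hs]; simp
    · rw [if_neg hs, if_neg hs]
      by_cases ho : pvOk T (pre ++ [u]) u.toNat pre.length (List.range pre.length) = true
      · rw [if_pos ho, ho]
        rw [ih (pre ++ [u]), hlen, ← hfull]
        simp
      · rw [if_neg ho]
        rw [show pvOk T (pre ++ [u]) u.toNat pre.length (List.range pre.length) = false from by
          simpa using ho]
        simp

-- on a complete candidate of length n, the incremental checks are exactly B's acceptance test

theorem pvQ_nil_eq_altPred (T : List (List Int)) (n : Nat) (scores : List Int)
    (p : List Int) (hp : p.length = n) :
    pvQ T n scores [] p = altPred T n scores p := by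
  rw [pvQ_eq_steps, List.nil_append, hp]
  rw [show (List.range' ([] : List Int).length n) = List.range n from by
    simp [List.range_eq_range']]
  rw [Bool.eq_iff_iff]
  simp only [altPred, Bool.and_eq_true, List.all_eq_true, List.mem_range, pvStep,
    pv_if_false_iff, pvOk_iff, beq_iff_eq, Bool.or_eq_true, not_not]
  constructor
  · rintro ⟨hinv, hstep⟩
    refine ⟨⟨fun i hi => (hstep i hi).1, hinv⟩, ?_⟩
    intro i hi j hj
    rcases Nat.lt_trichotomy i j with hij | hij | hij
    · right
      exact ((hstep j hj).2 i (by simpa using hij)).2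
    · left; exact hij
    · right
      exact ((hstep i hi).2 j (by simpa using hij)).1
  · rintro ⟨⟨hscore, hinv⟩, hanti⟩
    refine ⟨hinv, ?_⟩
    intro i hi
    refine ⟨hscore i hi, ?_⟩
    intro w hw
    have hwn : w < n := lt_trans hw hi
    constructor
    · rcases hanti i hi w hwn with h | h
      · omega
      · exact h
    · rcases hanti w hwn i hi with h | h
      · omega
      · exact h

-- main equality

theorem pv_main (T : List (List Int)) (nI : Int) :
    find_all_anti_automorphisms_involutive T nI = find_all_anti_automorphisms_involutive_alt T nI := by
  unfold find_all_anti_automorphisms_involutive find_all_anti_automorphisms_involutive_alt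
  have h0 : ((List.range nI.toNat).filter fun u => !(([] : List Nat)).contains u)
      = List.range nI.toNat := by
    simp
  have hb := pvBT_bridge T nI.toNat (pvScores T nI.toNat) nI.toNat [] []
  rw [h0] at hb
  have hb' := hb (by simp)
  simp only [List.length_nil, List.nil_append] at hb'
  rw [hb']
  rw [List.filterMap_congr (g := fun ext =>
      if altPred T nI.toNat (pvScores T nI.toNat) ext then some ext else none) ?_]
  · rw [pv_filterMap_guard]
    rw [PySem.List.foldl_append_if_eq_filter, List.nil_append]
  · intro ext hext
    have hlen : ext.length = nI.toNat :=
      altPerms_length nI.toNat _ (by simp) ext hext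
    rw [pvQ_nil_eq_altPred T nI.toNat _ ext hlen]

-- ===== VERDICT (by name: the statement is the Claim_ definition above) =====
theorem find_all_anti_automorphisms_involutive_spec : Claim_equal_find_all_anti_automorphisms_involutive := by
  intro T n _ _
  unfold Spec_find_all_anti_automorphisms_involutive
  exact pv_main T n
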